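-- pv_equiv track=rewrite | github.com/mindful-ai/28092020LVC | day_02/labs/fibo.py | checkfibo
-- ===== SOURCE A (Python) =====
-- def checkfibo(n):
--     x = 0
--     y = 1
--     while True:
--         z = x + y
--         if(n == z):
--             return (0, 0)
--         elif(z > n):
--             return (abs(n-y), abs(n-z))
--         x = y
--         y = z
-- ===== SOURCE B (Python) =====
-- def checkfibo(n):
--     # Build the Fibonacci list [1, 1, 2, 3, 5, ...] until the last value is >= n,
--     # then binary-search for the first entry >= n.
--     fibs = [1, 1]
--     while fibs[-1] < n:
--         fibs.append(fibs[-2] + fibs[-1])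
--     lo, hi = 0, len(fibs)
--     while lo < hi:
--         mid = (lo + hi) // 2
--         if fibs[mid] < n:
--             lo = mid + 1
--         else:
--             hi = mid
--     z = fibs[lo]
--     y = fibs[0] if lo == 0 else fibs[lo - 1]
--     if z == n:
--         return (0, 0)
--     return (abs(n - y), abs(n - z))
-- ===== Notes on version B (the rewrite author's own statement) =====
-- stated objective: alternative
-- what changed: B materialises the Fibonacci list [1,1,2,3,...] up to the first value >= n once, then locates the bracketing pair with a hand-written bisect_left binary search instead of A's single running-pair while-loop.
import Mathlib
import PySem

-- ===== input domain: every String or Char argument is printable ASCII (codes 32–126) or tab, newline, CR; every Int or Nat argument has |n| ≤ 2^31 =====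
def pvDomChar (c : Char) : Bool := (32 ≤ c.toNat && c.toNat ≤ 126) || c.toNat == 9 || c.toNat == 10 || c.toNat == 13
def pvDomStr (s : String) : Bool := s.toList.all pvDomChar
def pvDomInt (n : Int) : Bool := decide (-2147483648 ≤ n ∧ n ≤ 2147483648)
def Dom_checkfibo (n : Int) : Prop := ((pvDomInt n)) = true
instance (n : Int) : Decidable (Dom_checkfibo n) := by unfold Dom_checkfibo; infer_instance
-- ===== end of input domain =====

-- B rebuilds the bracketing Fibonacci pair by materialising the Fibonacci list once and
-- binary-searching it for the first entry ≥ n (alternative decomposition, same cost class).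

-- ===== PORT A =====
-- A's while-loop: state (x, y), z = x + y each turn; terminates since z strictly grows.
def checkfiboGo (n : Int) (x y : Nat) (hy : 1 ≤ y) : Int × Int :=
  if ((x + y : Nat) : Int) = n then (0, 0)
  else if n < ((x + y : Nat) : Int) then (|n - (y : Int)|, |n - ((x + y : Nat) : Int)|)
  else checkfiboGo n y (x + y) (by omega)
termination_by (n + 1 - (x + y : Nat)).toNat
decreasing_by
  rename_i h1 h2
  have hxy : ((x + y : Nat) : Int) < n := by
    push_cast at h1 h2 ⊢; omega
  push_cast at hxy ⊢
  omega

def checkfibo (n : Int) : Int × Int := checkfiboGo n 0 1 (by omega)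

-- ===== PORT B =====
-- the tail of B's list [1, 1, 2, 3, …]: values from b onward, pair (a, b) = last two entries
def fibsFrom (n : Int) (a b : Nat) (ha : 1 ≤ a) (hb : 1 ≤ b) : List Nat :=
  if (b : Int) < n then b :: fibsFrom n b (a + b) hb (by omega)
  else [b]
termination_by (n - b).toNat
decreasing_by
  rename_i h
  push_cast at h ⊢
  omega

-- B's hand-written bisect_left loop
def bsearch (xs : List Nat) (n : Int) (lo hi : Nat) : Nat :=
  if lo < hi then
    let mid := (lo + hi) / 2
    if ((xs.getD mid 0 : Nat) : Int) < n then bsearch xs n (mid + 1) hi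
    else bsearch xs n lo mid
  else lo
termination_by hi - lo
decreasing_by all_goals omega

def checkfibo_alt (n : Int) : Int × Int :=
  let fibs := 1 :: fibsFrom n 1 1 (by omega) (by omega)
  let i := bsearch fibs n 0 fibs.length
  let z := fibs.getD i 0
  let y := if i = 0 then fibs.getD 0 0 else fibs.getD (i - 1) 0
  if (z : Int) = n then (0, 0) else (|n - (y : Int)|, |n - (z : Int)|)

-- ===== PRECONDITION & SPEC =====
def Spec_checkfibo (n : Int) (out : Int × Int) : Prop := out = checkfibo_alt n
instance (n : Int) (out : Int × Int) : Decidable (Spec_checkfibo n out) := by unfold Spec_checkfibo; infer_instance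

-- ===== CLAIM (what is proved, stated in full; the proofs are below) =====
def Claim_equal_checkfibo : Prop := ∀ (n : Int), Dom_checkfibo n → Spec_checkfibo n (checkfibo n)

-- ===== LEMMAS AND PROOFS =====

-- all entries of fibsFrom are ≥ 1
theorem fibsFrom_pos (n : Int) (a b : Nat) (ha : 1 ≤ a) (hb : 1 ≤ b) :
    ∀ x ∈ fibsFrom n a b ha hb, 1 ≤ x := by
  fun_induction fibsFrom with
  | case1 a b ha hb h ih =>
      intro x hx
      rcases List.mem_cons.mp hx with h | h
      · omega
      · exact ih x h
  | case2 => intro x hx; simp at hx; omega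

theorem fibsFrom_len (n : Int) (a b : Nat) (ha : 1 ≤ a) (hb : 1 ≤ b) :
    1 ≤ (fibsFrom n a b ha hb).length := by
  fun_induction fibsFrom with
  | case1 => simp
  | case2 => simp

-- every entry before the last is < n
theorem fibsFrom_before (n : Int) (a b : Nat) (ha : 1 ≤ a) (hb : 1 ≤ b) :
    ∀ j, j < (fibsFrom n a b ha hb).length - 1 →
      (((fibsFrom n a b ha hb).getD j 0 : Nat) : Int) < n := by
  fun_induction fibsFrom with
  | case1 a b ha hb h ih =>
      intro j hj
      cases j with
      | zero => simpa using h
      | succ k =>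
          simp only [List.length_cons] at hj
          simpa using ih k (by omega)
  | case2 => intro j hj; simp at hj

-- the last entry is ≥ n
theorem fibsFrom_last (n : Int) (a b : Nat) (ha : 1 ≤ a) (hb : 1 ≤ b) :
    n ≤ (((fibsFrom n a b ha hb).getD ((fibsFrom n a b ha hb).length - 1) 0 : Nat) : Int) := by
  fun_induction fibsFrom with
  | case1 a b ha hb h ih =>
      have hl := fibsFrom_len n b (a + b) hb (by omega)
      simp only [List.length_cons]
      rw [show (fibsFrom n b (a+b) hb (by omega : 1 ≤ a + b)).length + 1 - 1
            = ((fibsFrom n b (a+b) hb (by omega : 1 ≤ a + b)).length - 1) + 1 by omega]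
      simpa using ih
  | case2 a b ha hb h => simp; omega

-- A's loop expressed through the list B builds
theorem checkfiboGo_eq (n : Int) (x y : Nat) (hy : 1 ≤ y) :
    checkfiboGo n x y hy =
      (let ys := fibsFrom n y (x + y) hy (by omega)
       let z := ys.getD (ys.length - 1) 0
       let w := if ys.length = 1 then y else ys.getD (ys.length - 2) 0
       if (z : Int) = n then (0, 0) else (|n - (w : Int)|, |n - (z : Int)|)) := by
  fun_induction checkfiboGo with
  | case1 x y hy h =>
      -- z = n : fibsFrom = [x+y] since ¬ (x+y) < n
      rw [fibsFrom, if_neg (show ¬ ((x + y : Nat) : Int) < n by push_cast at h ⊢; omega)]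
      simp [h]
  | case2 x y hy h1 h2 =>
      rw [fibsFrom, if_neg (show ¬ ((x + y : Nat) : Int) < n by push_cast at h2 ⊢; omega)]
      simp
      intro hc
      exfalso
      omega
  | case3 x y hy h1 h2 ih =>
      have hlt : ((x + y : Nat) : Int) < n := by omega
      rw [fibsFrom]
      simp only [hlt, if_pos]
      rw [ih]
      have hl := fibsFrom_len n (x + y) (y + (x + y)) (by omega) (by omega)
      set ys' := fibsFrom n (x + y) (y + (x + y)) (by omega) (by omega) with hys'
      simp only [List.length_cons]
      have h1' : (x + y) :: ys' ≠ [] := by simp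
      rw [show ys'.length + 1 - 1 = (ys'.length - 1) + 1 by omega]
      simp only [List.getD_cons_succ]
      have hlen1 : ¬ (ys'.length + 1 = 1) := by omega
      rw [if_neg hlen1]
      by_cases hone : ys'.length = 1
      · rw [if_pos hone]
        rw [show ys'.length + 1 - 2 = 0 by omega]
        simp
      · rw [if_neg hone]
        rw [show ys'.length + 1 - 2 = (ys'.length - 2) + 1 by omega]
        simp

-- binary search returns the unique boundary index I
theorem bsearch_spec (xs : List Nat) (n : Int) (I : Nat) (_hI : I ≤ xs.length)
    (hlow : ∀ j, j < I → ((xs.getD j 0 : Nat) : Int) < n)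
    (hhigh : ∀ j, I ≤ j → j < xs.length → n ≤ ((xs.getD j 0 : Nat) : Int)) :
    ∀ lo hi, lo ≤ I → I ≤ hi → hi ≤ xs.length → bsearch xs n lo hi = I := by
  intro lo hi
  fun_induction bsearch xs n lo hi with
  | case1 lo hi hlt mid hmid ih =>
      intro h1 h2 h3
      have hmidI : mid < I := by
        by_contra hc
        have := hhigh mid (by omega) (by omega)
        omega
      exact ih (by omega) h2 h3
  | case2 lo hi hlt mid hmid ih =>
      intro h1 h2 h3
      have hmidI : I ≤ mid := by
        by_contra hc
        have := hlow mid (by omega)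
        omega
      exact ih h1 hmidI (by omega)
  | case3 lo hi hlt =>
      intro h1 h2 h3
      omega

theorem checkfibo_eq_alt (n : Int) : checkfibo n = checkfibo_alt n := by
  unfold checkfibo checkfibo_alt
  rw [checkfiboGo_eq]
  set ys := fibsFrom n 1 (0 + 1) (by omega) (Nat.le_add_left 1 0) with hys
  have hl := fibsFrom_len n 1 (0 + 1) (by omega) (Nat.le_add_left 1 0)
  have hpos := fibsFrom_pos n 1 (0 + 1) (by omega) (Nat.le_add_left 1 0)
  have hbef := fibsFrom_before n 1 (0 + 1) (by omega) (Nat.le_add_left 1 0)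
  have hlast := fibsFrom_last n 1 (0 + 1) (by omega) (Nat.le_add_left 1 0)
  rw [← hys] at hl hpos hbef hlast
  by_cases hn : n ≤ 1
  · -- boundary index is 0: every entry of 1 :: ys is ≥ 1 ≥ n
    have hb0 : bsearch (1 :: ys) n 0 (1 :: ys).length = 0 := by
      apply bsearch_spec (1 :: ys) n 0 (by simp) (by omega)
      · intro j _ hj
        simp only [List.length_cons] at hj
        cases j with
        | zero => simpa using hn
        | succ k =>
            simp only [List.getD_cons_succ]
            by_cases hk : k < ys.length
            · have hmem : ys.getD k 0 ∈ ys := by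
                rw [List.getD_eq_getElem ys 0 hk]; exact List.getElem_mem hk
              have := hpos (ys.getD k 0) hmem
              omega
            · rw [List.getD_eq_default _ _ (by omega)]; omega
      all_goals omega
    -- ys = [1] since ¬ (1 < n)
    have hys_eq : ys = [1] := by
      rw [hys, fibsFrom]
      rw [if_neg (show ¬ (((0 + 1 : Nat) : Int)) < n by push_cast; omega)]
    rw [hys_eq] at hb0
    rw [hys_eq]
    simp only [List.length_cons, List.length_nil] at hb0
    simp [hb0]
  · -- boundary index is ys.length (the last position of 1 :: ys)
    have hb : bsearch (1 :: ys) n 0 (1 :: ys).length = ys.length := by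
      apply bsearch_spec (1 :: ys) n ys.length (by simp)
      · intro j hj
        cases j with
        | zero => simpa using (by omega : (1 : Int) < n)
        | succ k =>
            simp only [List.getD_cons_succ]
            exact hbef k (by omega)
      · intro j h1 h2
        simp only [List.length_cons] at h2
        have hj : j = ys.length := by omega
        subst hj
        rw [show (ys.length : Nat) = (ys.length - 1) + 1 by omega]
        simpa using hlast
      all_goals simp
    obtain ⟨m, hm⟩ : ∃ m, ys.length = m + 1 := ⟨ys.length - 1, by omega⟩
    simp only [hb, hm]
    rw [if_neg (show ¬ (m + 1 = 0) by omega)]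
    simp only [List.getD_cons_succ]
    rw [show m + 1 - 1 = m by omega]
    by_cases hm0 : m = 0
    · subst hm0
      simp
    · rw [if_neg (show ¬ (m + 1 = 1) by omega)]
      rw [show m + 1 - 2 = m - 1 by omega]
      rw [show (m : Nat) = (m - 1) + 1 by omega]
      simp

-- ===== VERDICT (by name: the statement is the Claim_ definition above) =====
theorem checkfibo_spec : Claim_equal_checkfibo := by
  intro n _
  unfold Spec_checkfibo
  exact checkfibo_eq_alt n
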